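-- pv_equiv track=rewrite | github.com/msg555/mtg | mtg.py | lower_mobius_transform
-- ===== SOURCE A (Python) =====
-- COLORS = "WUBRG"
--
-- ALL_COLORS_SET = (2 ** len(COLORS)) - 1
--
-- def lower_mobius_transform(freq):
--   """
--   Computes the lower mobius transform of freq, mapping color bitsets to
--   counts.
--
--   Returns g(s) = sum(f(t) for t \subseteq s)
--   """
--   result = [freq.get(index, 0) for index in range(2 ** len(COLORS))]
--   for index in range(len(COLORS)):
--     col = 2 ** index
--     iter_st = ALL_COLORS_SET ^ col
--     st = iter_st
--     while True:
--       result[st | col] += result[st]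
--       if st == 0:
--         break
--       st = (st - 1) & iter_st
--   return result
-- ===== SOURCE B (Python) =====
-- COLORS = "WUBRG"
--
-- ALL_COLORS_SET = (2 ** len(COLORS)) - 1
--
-- def lower_mobius_transform(freq):
--   """
--   Computes the lower mobius transform of freq, mapping color bitsets to
--   counts.
--
--   Returns g(s) = sum(f(t) for t \subseteq s)
--   """
--   result = []
--   for s in range(2 ** len(COLORS)):
--     total = 0
--     t = s
--     while True:
--       total += freq.get(t, 0)
--       if t == 0:
--         break
--       t = (t - 1) & s
--     result.append(total)
--   return result
-- ===== Notes on version B (the rewrite author's own statement) =====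
-- stated objective: simpler
-- what changed: Replaces the in-place per-bit subset-sum DP (5 passes propagating result[st|col] += result[st]) by a direct per-target computation: for each mask s, sum freq.get(t,0) over all submasks t of s via the standard (t-1)&s enumeration.
import Mathlib
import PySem

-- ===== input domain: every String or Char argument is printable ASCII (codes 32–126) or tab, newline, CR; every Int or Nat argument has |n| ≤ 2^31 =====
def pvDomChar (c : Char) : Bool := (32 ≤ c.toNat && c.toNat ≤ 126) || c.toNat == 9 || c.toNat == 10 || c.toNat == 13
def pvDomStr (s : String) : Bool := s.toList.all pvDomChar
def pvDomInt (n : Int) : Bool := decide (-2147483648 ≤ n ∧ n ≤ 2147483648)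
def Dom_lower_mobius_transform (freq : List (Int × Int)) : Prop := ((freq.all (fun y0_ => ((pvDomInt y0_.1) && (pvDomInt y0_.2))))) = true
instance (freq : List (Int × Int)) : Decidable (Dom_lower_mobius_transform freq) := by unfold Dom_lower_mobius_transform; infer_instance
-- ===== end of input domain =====

-- B computes each g(s) directly as a per-target submask sum (no in-place DP); objective: simpler/alternative.
-- Both functions are total; loop counters are provably nonnegative masks < 32, so they are ported as Nat (exact here).

-- ===== PORT A =====
-- freq.get(k, 0)
def pvGet (freq : List (Int × Int)) (k : Int) : Int := PySem.Dict.getD (PySem.Dict.mk freq) k 0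

-- A's inner while loop: result[st | col] += result[st]; if st == 0: break; st = (st - 1) & iter_st
-- (st, st | col are always < 32 = result length, so List.set/getD never hit their defaults)
def pvAWhile (res : List Int) (col iterSt st : Nat) : List Int :=
  let res' := res.set (st ||| col) (res.getD (st ||| col) 0 + res.getD st 0)
  if st = 0 then res'
  else pvAWhile res' col iterSt ((st - 1) &&& iterSt)
termination_by st
decreasing_by exact Nat.lt_of_le_of_lt Nat.and_le_left (Nat.sub_lt (Nat.pos_of_ne_zero ‹_›) one_pos)

def lower_mobius_transform (freq : List (Int × Int)) : List Int :=
  let result := (PySem.List.pyRange 0 32 1).map (fun index => pvGet freq index)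
  (List.range 5).foldl (fun res index =>
    let col := 2 ^ index
    let iterSt := 31 ^^^ col
    pvAWhile res col iterSt iterSt) result

-- ===== PORT B =====
-- B's while loop: total += freq.get(t, 0); if t == 0: break; t = (t - 1) & s
def pvSubLoop (freq : List (Int × Int)) (s t : Nat) (total : Int) : Int :=
  let total' := total + pvGet freq (t : Int)
  if t = 0 then total'
  else pvSubLoop freq s ((t - 1) &&& s) total'
termination_by t
decreasing_by exact Nat.lt_of_le_of_lt Nat.and_le_left (Nat.sub_lt (Nat.pos_of_ne_zero ‹_›) one_pos)

def lower_mobius_transform_alt (freq : List (Int × Int)) : List Int :=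
  (List.range 32).map (fun s => pvSubLoop freq s s 0)

-- ===== PRECONDITION & SPEC =====
def Spec_lower_mobius_transform (freq : List (Int × Int)) (out : List Int) : Prop := out = lower_mobius_transform_alt freq
instance (freq : List (Int × Int)) (out : List Int) : Decidable (Spec_lower_mobius_transform freq out) := by unfold Spec_lower_mobius_transform; infer_instance

-- ===== CLAIM (what is proved, stated in full; the proofs are below) =====
def Claim_equal_lower_mobius_transform : Prop := ∀ (freq : List (Int × Int)), Dom_lower_mobius_transform freq → Spec_lower_mobius_transform freq (lower_mobius_transform freq)

-- ===== LEMMAS AND PROOFS =====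
-- One symbolic-evaluation lemma per outer pass of A's DP (entries x0..x31 arbitrary),
-- and one per target mask s for B's direct submask sum; all generated by unfolding the loops.

set_option maxRecDepth 8000 in
theorem pvStepA_0 (x0 x1 x2 x3 x4 x5 x6 x7 x8 x9 x10 x11 x12 x13 x14 x15 x16 x17 x18 x19 x20 x21 x22 x23 x24 x25 x26 x27 x28 x29 x30 x31 : Int) :
    pvAWhile [x0, x1, x2, x3, x4, x5, x6, x7, x8, x9, x10, x11, x12, x13, x14, x15, x16, x17, x18, x19, x20, x21, x22, x23, x24, x25, x26, x27, x28, x29, x30, x31] 1 30 30 = [x0, x1 + x0, x2, x3 + x2, x4, x5 + x4, x6, x7 + x6, x8, x9 + x8, x10, x11 + x10, x12, x13 + x12, x14, x15 + x14, x16, x17 + x16, x18, x19 + x18, x20, x21 + x20, x22, x23 + x22, x24, x25 + x24, x26, x27 + x26, x28, x29 + x28, x30, x31 + x30] := by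
  simp [pvAWhile]

set_option maxRecDepth 8000 in
theorem pvStepA_1 (x0 x1 x2 x3 x4 x5 x6 x7 x8 x9 x10 x11 x12 x13 x14 x15 x16 x17 x18 x19 x20 x21 x22 x23 x24 x25 x26 x27 x28 x29 x30 x31 : Int) :
    pvAWhile [x0, x1, x2, x3, x4, x5, x6, x7, x8, x9, x10, x11, x12, x13, x14, x15, x16, x17, x18, x19, x20, x21, x22, x23, x24, x25, x26, x27, x28, x29, x30, x31] 2 29 29 = [x0, x1, x2 + x0, x3 + x1, x4, x5, x6 + x4, x7 + x5, x8, x9, x10 + x8, x11 + x9, x12, x13, x14 + x12, x15 + x13, x16, x17, x18 + x16, x19 + x17, x20, x21, x22 + x20, x23 + x21, x24, x25, x26 + x24, x27 + x25, x28, x29, x30 + x28, x31 + x29] := by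
  simp [pvAWhile]

set_option maxRecDepth 8000 in
theorem pvStepA_2 (x0 x1 x2 x3 x4 x5 x6 x7 x8 x9 x10 x11 x12 x13 x14 x15 x16 x17 x18 x19 x20 x21 x22 x23 x24 x25 x26 x27 x28 x29 x30 x31 : Int) :
    pvAWhile [x0, x1, x2, x3, x4, x5, x6, x7, x8, x9, x10, x11, x12, x13, x14, x15, x16, x17, x18, x19, x20, x21, x22, x23, x24, x25, x26, x27, x28, x29, x30, x31] 4 27 27 = [x0, x1, x2, x3, x4 + x0, x5 + x1, x6 + x2, x7 + x3, x8, x9, x10, x11, x12 + x8, x13 + x9, x14 + x10, x15 + x11, x16, x17, x18, x19, x20 + x16, x21 + x17, x22 + x18, x23 + x19, x24, x25, x26, x27, x28 + x24, x29 + x25, x30 + x26, x31 + x27] := by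
  simp [pvAWhile]

set_option maxRecDepth 8000 in
theorem pvStepA_3 (x0 x1 x2 x3 x4 x5 x6 x7 x8 x9 x10 x11 x12 x13 x14 x15 x16 x17 x18 x19 x20 x21 x22 x23 x24 x25 x26 x27 x28 x29 x30 x31 : Int) :
    pvAWhile [x0, x1, x2, x3, x4, x5, x6, x7, x8, x9, x10, x11, x12, x13, x14, x15, x16, x17, x18, x19, x20, x21, x22, x23, x24, x25, x26, x27, x28, x29, x30, x31] 8 23 23 = [x0, x1, x2, x3, x4, x5, x6, x7, x8 + x0, x9 + x1, x10 + x2, x11 + x3, x12 + x4, x13 + x5, x14 + x6, x15 + x7, x16, x17, x18, x19, x20, x21, x22, x23, x24 + x16, x25 + x17, x26 + x18, x27 + x19, x28 + x20, x29 + x21, x30 + x22, x31 + x23] := by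
  simp [pvAWhile]

set_option maxRecDepth 8000 in
theorem pvStepA_4 (x0 x1 x2 x3 x4 x5 x6 x7 x8 x9 x10 x11 x12 x13 x14 x15 x16 x17 x18 x19 x20 x21 x22 x23 x24 x25 x26 x27 x28 x29 x30 x31 : Int) :
    pvAWhile [x0, x1, x2, x3, x4, x5, x6, x7, x8, x9, x10, x11, x12, x13, x14, x15, x16, x17, x18, x19, x20, x21, x22, x23, x24, x25, x26, x27, x28, x29, x30, x31] 16 15 15 = [x0, x1, x2, x3, x4, x5, x6, x7, x8, x9, x10, x11, x12, x13, x14, x15, x16 + x0, x17 + x1, x18 + x2, x19 + x3, x20 + x4, x21 + x5, x22 + x6, x23 + x7, x24 + x8, x25 + x9, x26 + x10, x27 + x11, x28 + x12, x29 + x13, x30 + x14, x31 + x15] := by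
  simp [pvAWhile]

set_option maxRecDepth 8000 in
theorem pvB_0 (freq : List (Int × Int)) : pvSubLoop freq 0 0 0 = pvGet freq 0 := by
  simp [pvSubLoop]

set_option maxRecDepth 8000 in
theorem pvB_1 (freq : List (Int × Int)) : pvSubLoop freq 1 1 0 = pvGet freq 1 + pvGet freq 0 := by
  simp [pvSubLoop]

set_option maxRecDepth 8000 in
theorem pvB_2 (freq : List (Int × Int)) : pvSubLoop freq 2 2 0 = pvGet freq 2 + pvGet freq 0 := by
  simp [pvSubLoop]

set_option maxRecDepth 8000 in
theorem pvB_3 (freq : List (Int × Int)) : pvSubLoop freq 3 3 0 = pvGet freq 3 + pvGet freq 2 + pvGet freq 1 + pvGet freq 0 := by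
  simp [pvSubLoop]

set_option maxRecDepth 8000 in
theorem pvB_4 (freq : List (Int × Int)) : pvSubLoop freq 4 4 0 = pvGet freq 4 + pvGet freq 0 := by
  simp [pvSubLoop]

set_option maxRecDepth 8000 in
theorem pvB_5 (freq : List (Int × Int)) : pvSubLoop freq 5 5 0 = pvGet freq 5 + pvGet freq 4 + pvGet freq 1 + pvGet freq 0 := by
  simp [pvSubLoop]

set_option maxRecDepth 8000 in
theorem pvB_6 (freq : List (Int × Int)) : pvSubLoop freq 6 6 0 = pvGet freq 6 + pvGet freq 4 + pvGet freq 2 + pvGet freq 0 := by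
  simp [pvSubLoop]

set_option maxRecDepth 8000 in
theorem pvB_7 (freq : List (Int × Int)) : pvSubLoop freq 7 7 0 = pvGet freq 7 + pvGet freq 6 + pvGet freq 5 + pvGet freq 4 + pvGet freq 3 + pvGet freq 2 + pvGet freq 1 + pvGet freq 0 := by
  simp [pvSubLoop]

set_option maxRecDepth 8000 in
theorem pvB_8 (freq : List (Int × Int)) : pvSubLoop freq 8 8 0 = pvGet freq 8 + pvGet freq 0 := by
  simp [pvSubLoop]

set_option maxRecDepth 8000 in
theorem pvB_9 (freq : List (Int × Int)) : pvSubLoop freq 9 9 0 = pvGet freq 9 + pvGet freq 8 + pvGet freq 1 + pvGet freq 0 := by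
  simp [pvSubLoop]

set_option maxRecDepth 8000 in
theorem pvB_10 (freq : List (Int × Int)) : pvSubLoop freq 10 10 0 = pvGet freq 10 + pvGet freq 8 + pvGet freq 2 + pvGet freq 0 := by
  simp [pvSubLoop]

set_option maxRecDepth 8000 in
theorem pvB_11 (freq : List (Int × Int)) : pvSubLoop freq 11 11 0 = pvGet freq 11 + pvGet freq 10 + pvGet freq 9 + pvGet freq 8 + pvGet freq 3 + pvGet freq 2 + pvGet freq 1 + pvGet freq 0 := by
  simp [pvSubLoop]

set_option maxRecDepth 8000 in
theorem pvB_12 (freq : List (Int × Int)) : pvSubLoop freq 12 12 0 = pvGet freq 12 + pvGet freq 8 + pvGet freq 4 + pvGet freq 0 := by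
  simp [pvSubLoop]

set_option maxRecDepth 8000 in
theorem pvB_13 (freq : List (Int × Int)) : pvSubLoop freq 13 13 0 = pvGet freq 13 + pvGet freq 12 + pvGet freq 9 + pvGet freq 8 + pvGet freq 5 + pvGet freq 4 + pvGet freq 1 + pvGet freq 0 := by
  simp [pvSubLoop]

set_option maxRecDepth 8000 in
theorem pvB_14 (freq : List (Int × Int)) : pvSubLoop freq 14 14 0 = pvGet freq 14 + pvGet freq 12 + pvGet freq 10 + pvGet freq 8 + pvGet freq 6 + pvGet freq 4 + pvGet freq 2 + pvGet freq 0 := by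
  simp [pvSubLoop]

set_option maxRecDepth 8000 in
theorem pvB_15 (freq : List (Int × Int)) : pvSubLoop freq 15 15 0 = pvGet freq 15 + pvGet freq 14 + pvGet freq 13 + pvGet freq 12 + pvGet freq 11 + pvGet freq 10 + pvGet freq 9 + pvGet freq 8 + pvGet freq 7 + pvGet freq 6 + pvGet freq 5 + pvGet freq 4 + pvGet freq 3 + pvGet freq 2 + pvGet freq 1 + pvGet freq 0 := by
  simp [pvSubLoop]

set_option maxRecDepth 8000 in
theorem pvB_16 (freq : List (Int × Int)) : pvSubLoop freq 16 16 0 = pvGet freq 16 + pvGet freq 0 := by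
  simp [pvSubLoop]

set_option maxRecDepth 8000 in
theorem pvB_17 (freq : List (Int × Int)) : pvSubLoop freq 17 17 0 = pvGet freq 17 + pvGet freq 16 + pvGet freq 1 + pvGet freq 0 := by
  simp [pvSubLoop]

set_option maxRecDepth 8000 in
theorem pvB_18 (freq : List (Int × Int)) : pvSubLoop freq 18 18 0 = pvGet freq 18 + pvGet freq 16 + pvGet freq 2 + pvGet freq 0 := by
  simp [pvSubLoop]

set_option maxRecDepth 8000 in
theorem pvB_19 (freq : List (Int × Int)) : pvSubLoop freq 19 19 0 = pvGet freq 19 + pvGet freq 18 + pvGet freq 17 + pvGet freq 16 + pvGet freq 3 + pvGet freq 2 + pvGet freq 1 + pvGet freq 0 := by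
  simp [pvSubLoop]

set_option maxRecDepth 8000 in
theorem pvB_20 (freq : List (Int × Int)) : pvSubLoop freq 20 20 0 = pvGet freq 20 + pvGet freq 16 + pvGet freq 4 + pvGet freq 0 := by
  simp [pvSubLoop]

set_option maxRecDepth 8000 in
theorem pvB_21 (freq : List (Int × Int)) : pvSubLoop freq 21 21 0 = pvGet freq 21 + pvGet freq 20 + pvGet freq 17 + pvGet freq 16 + pvGet freq 5 + pvGet freq 4 + pvGet freq 1 + pvGet freq 0 := by
  simp [pvSubLoop]

set_option maxRecDepth 8000 in
theorem pvB_22 (freq : List (Int × Int)) : pvSubLoop freq 22 22 0 = pvGet freq 22 + pvGet freq 20 + pvGet freq 18 + pvGet freq 16 + pvGet freq 6 + pvGet freq 4 + pvGet freq 2 + pvGet freq 0 := by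
  simp [pvSubLoop]

set_option maxRecDepth 8000 in
theorem pvB_23 (freq : List (Int × Int)) : pvSubLoop freq 23 23 0 = pvGet freq 23 + pvGet freq 22 + pvGet freq 21 + pvGet freq 20 + pvGet freq 19 + pvGet freq 18 + pvGet freq 17 + pvGet freq 16 + pvGet freq 7 + pvGet freq 6 + pvGet freq 5 + pvGet freq 4 + pvGet freq 3 + pvGet freq 2 + pvGet freq 1 + pvGet freq 0 := by
  simp [pvSubLoop]

set_option maxRecDepth 8000 in
theorem pvB_24 (freq : List (Int × Int)) : pvSubLoop freq 24 24 0 = pvGet freq 24 + pvGet freq 16 + pvGet freq 8 + pvGet freq 0 := by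
  simp [pvSubLoop]

set_option maxRecDepth 8000 in
theorem pvB_25 (freq : List (Int × Int)) : pvSubLoop freq 25 25 0 = pvGet freq 25 + pvGet freq 24 + pvGet freq 17 + pvGet freq 16 + pvGet freq 9 + pvGet freq 8 + pvGet freq 1 + pvGet freq 0 := by
  simp [pvSubLoop]

set_option maxRecDepth 8000 in
theorem pvB_26 (freq : List (Int × Int)) : pvSubLoop freq 26 26 0 = pvGet freq 26 + pvGet freq 24 + pvGet freq 18 + pvGet freq 16 + pvGet freq 10 + pvGet freq 8 + pvGet freq 2 + pvGet freq 0 := by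
  simp [pvSubLoop]

set_option maxRecDepth 8000 in
theorem pvB_27 (freq : List (Int × Int)) : pvSubLoop freq 27 27 0 = pvGet freq 27 + pvGet freq 26 + pvGet freq 25 + pvGet freq 24 + pvGet freq 19 + pvGet freq 18 + pvGet freq 17 + pvGet freq 16 + pvGet freq 11 + pvGet freq 10 + pvGet freq 9 + pvGet freq 8 + pvGet freq 3 + pvGet freq 2 + pvGet freq 1 + pvGet freq 0 := by
  simp [pvSubLoop]

set_option maxRecDepth 8000 in
theorem pvB_28 (freq : List (Int × Int)) : pvSubLoop freq 28 28 0 = pvGet freq 28 + pvGet freq 24 + pvGet freq 20 + pvGet freq 16 + pvGet freq 12 + pvGet freq 8 + pvGet freq 4 + pvGet freq 0 := by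
  simp [pvSubLoop]

set_option maxRecDepth 8000 in
theorem pvB_29 (freq : List (Int × Int)) : pvSubLoop freq 29 29 0 = pvGet freq 29 + pvGet freq 28 + pvGet freq 25 + pvGet freq 24 + pvGet freq 21 + pvGet freq 20 + pvGet freq 17 + pvGet freq 16 + pvGet freq 13 + pvGet freq 12 + pvGet freq 9 + pvGet freq 8 + pvGet freq 5 + pvGet freq 4 + pvGet freq 1 + pvGet freq 0 := by
  simp [pvSubLoop]

set_option maxRecDepth 8000 in
theorem pvB_30 (freq : List (Int × Int)) : pvSubLoop freq 30 30 0 = pvGet freq 30 + pvGet freq 28 + pvGet freq 26 + pvGet freq 24 + pvGet freq 22 + pvGet freq 20 + pvGet freq 18 + pvGet freq 16 + pvGet freq 14 + pvGet freq 12 + pvGet freq 10 + pvGet freq 8 + pvGet freq 6 + pvGet freq 4 + pvGet freq 2 + pvGet freq 0 := by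
  simp [pvSubLoop]

set_option maxRecDepth 8000 in
theorem pvB_31 (freq : List (Int × Int)) : pvSubLoop freq 31 31 0 = pvGet freq 31 + pvGet freq 30 + pvGet freq 29 + pvGet freq 28 + pvGet freq 27 + pvGet freq 26 + pvGet freq 25 + pvGet freq 24 + pvGet freq 23 + pvGet freq 22 + pvGet freq 21 + pvGet freq 20 + pvGet freq 19 + pvGet freq 18 + pvGet freq 17 + pvGet freq 16 + pvGet freq 15 + pvGet freq 14 + pvGet freq 13 + pvGet freq 12 + pvGet freq 11 + pvGet freq 10 + pvGet freq 9 + pvGet freq 8 + pvGet freq 7 + pvGet freq 6 + pvGet freq 5 + pvGet freq 4 + pvGet freq 3 + pvGet freq 2 + pvGet freq 1 + pvGet freq 0 := by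
  simp [pvSubLoop]

-- ===== VERDICT (by name: the statement is the Claim_ definition above) =====
set_option maxRecDepth 8000 in
set_option maxHeartbeats 2000000 in
theorem lower_mobius_transform_spec : Claim_equal_lower_mobius_transform := by
  intro freq _
  unfold Spec_lower_mobius_transform
  rw [lower_mobius_transform, lower_mobius_transform_alt]
  rw [show PySem.List.pyRange 0 32 1 = [0,1,2,3,4,5,6,7,8,9,10,11,12,13,14,15,16,17,18,19,20,21,22,23,24,25,26,27,28,29,30,31] from by decide]
  rw [show List.range 5 = [0,1,2,3,4] from by decide]
  rw [show List.range 32 = [0,1,2,3,4,5,6,7,8,9,10,11,12,13,14,15,16,17,18,19,20,21,22,23,24,25,26,27,28,29,30,31] from by decide]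
  simp only [List.map, List.foldl, Nat.reducePow, Nat.reduceXor]
  rw [pvStepA_0, pvStepA_1, pvStepA_2, pvStepA_3, pvStepA_4]
  rw [pvB_0, pvB_1, pvB_2, pvB_3, pvB_4, pvB_5, pvB_6, pvB_7, pvB_8, pvB_9, pvB_10, pvB_11, pvB_12, pvB_13, pvB_14, pvB_15, pvB_16, pvB_17, pvB_18, pvB_19, pvB_20, pvB_21, pvB_22, pvB_23, pvB_24, pvB_25, pvB_26, pvB_27, pvB_28, pvB_29, pvB_30, pvB_31]
  simp only [List.cons.injEq, and_true]
  and_intros <;> first | trivial | ring
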